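-- pv_equiv track=rewrite | github.com/kmedved/pbpstats | historic_backfill/build_large_minute_outlier_family_register.py | _choose_primary_family
-- ===== SOURCE A (Python) =====
-- from typing import Any, Dict, Iterable, List
--
-- def _choose_primary_family(families: Iterable[str]) -> str:
--     priority = [
--         "v3_ordering_candidate",
--         "starter_simple_candidate",
--         "starter_complex_candidate",
--         "period_sized_residual",
--         "source_conflict_or_missing_source",
--         "other_large_outlier",
--     ]
--     family_set = set(families)
--     for family in priority:
--         if family in family_set:
--             return family
--     return "other_large_outlier"
-- ===== SOURCE B (Python) =====
-- def _choose_primary_family(families):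
--     priority = [
--         "v3_ordering_candidate",
--         "starter_simple_candidate",
--         "starter_complex_candidate",
--         "period_sized_residual",
--         "source_conflict_or_missing_source",
--         "other_large_outlier",
--     ]
--     rank = {name: i for i, name in enumerate(priority)}
--     best = len(priority)
--     for name in families:
--         r = rank.get(name, len(priority))
--         if r < best:
--             best = r
--     if best < len(priority):
--         return priority[best]
--     return "other_large_outlier"
-- ===== Notes on version B (the rewrite author's own statement) =====
-- stated objective: alternative
-- what changed: B builds a name-to-index rank dict once and makes a single pass over families keeping the minimum rank, instead of A's early-return scan over the fixed priority list against set(families).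
import Mathlib
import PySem

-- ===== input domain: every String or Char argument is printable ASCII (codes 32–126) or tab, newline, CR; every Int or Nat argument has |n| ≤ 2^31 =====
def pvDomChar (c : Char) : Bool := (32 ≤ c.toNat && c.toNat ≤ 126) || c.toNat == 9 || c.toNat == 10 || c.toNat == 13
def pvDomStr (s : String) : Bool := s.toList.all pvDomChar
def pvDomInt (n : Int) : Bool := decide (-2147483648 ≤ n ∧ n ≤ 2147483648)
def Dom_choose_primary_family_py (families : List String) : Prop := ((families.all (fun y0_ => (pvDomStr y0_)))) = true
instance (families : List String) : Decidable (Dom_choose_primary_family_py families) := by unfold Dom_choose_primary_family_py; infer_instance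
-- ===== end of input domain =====

-- B replaces A's early-return scan over the fixed priority list against set(families) by a
-- single pass over families maintaining the minimum rank from a precomputed rank dict (objective: alternative decomposition).

-- ===== PORT A =====
def pvPriority : List String :=
  ["v3_ordering_candidate", "starter_simple_candidate", "starter_complex_candidate",
   "period_sized_residual", "source_conflict_or_missing_source", "other_large_outlier"]

-- the 'for family in priority: if family in family_set: return family' loop
def pvALoop (family_set : PySem.Set String) : List String → String
  | [] => "other_large_outlier"
  | f :: rest => if PySem.Set.contains family_set f then f else pvALoop family_set rest

def choose_primary_family_py (families : List String) : String :=
  pvALoop (PySem.Set.ofList families) pvPriority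

-- ===== PORT B =====
def pvPriorityB : List String :=
  ["v3_ordering_candidate", "starter_simple_candidate", "starter_complex_candidate",
   "period_sized_residual", "source_conflict_or_missing_source", "other_large_outlier"]

-- rank = {name: i for i, name in enumerate(priority)}
def pvRank : PySem.Dict String Int :=
  (PySem.List.enumerate pvPriorityB).foldl (fun d p => d.insert p.2 p.1) PySem.Dict.empty

-- loop body: r = rank.get(name, len(priority)); if r < best: best = r
def pvStep (best : Int) (name : String) : Int :=
  let r := pvRank.getD name (pvPriorityB.length : Int)
  if r < best then r else best

def choose_primary_family_py_alt (families : List String) : String :=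
  let best := families.foldl pvStep (pvPriorityB.length : Int)
  if best < (pvPriorityB.length : Int) then
    -- priority[best]; the none branch only totalizes the in-range indexing
    match PySem.List.pyGet? pvPriorityB best with
    | some s => s
    | none => "other_large_outlier"
  else "other_large_outlier"

-- ===== PRECONDITION & SPEC =====
def Spec_choose_primary_family_py (families : List String) (out : String) : Prop := out = choose_primary_family_py_alt families
instance (families : List String) (out : String) : Decidable (Spec_choose_primary_family_py families out) := by unfold Spec_choose_primary_family_py; infer_instance

-- ===== CLAIM (what is proved, stated in full; the proofs are below) =====
def Claim_equal_choose_primary_family_py : Prop := ∀ (families : List String), Dom_choose_primary_family_py families → Spec_choose_primary_family_py families (choose_primary_family_py families)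

-- ===== LEMMAS AND PROOFS =====

-- the rank lookup with default, as an explicit if-chain
def pvRk (x : String) : Int :=
  if x = "v3_ordering_candidate" then 0
  else if x = "starter_simple_candidate" then 1
  else if x = "starter_complex_candidate" then 2
  else if x = "period_sized_residual" then 3
  else if x = "source_conflict_or_missing_source" then 4
  else if x = "other_large_outlier" then 5
  else 6

theorem pvRk_spec (x : String) : pvRank.getD x (pvPriorityB.length : Int) = pvRk x := by
  simp [pvRank, pvPriorityB, PySem.List.enumerate, List.foldl, pvRk,
        PySem.Dict.getD, PySem.Dict.get?_insert, PySem.Dict.empty]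
  split_ifs <;> first | rfl | simp_all

theorem pvStep_min (b : Int) (x : String) : pvStep b x = min b (pvRk x) := by
  simp [pvStep, pvRk_spec]
  omega

-- index of the first priority name present in xs (6 if none)
def pvC (xs : List String) : Int :=
  if xs.contains "v3_ordering_candidate" then 0
  else if xs.contains "starter_simple_candidate" then 1
  else if xs.contains "starter_complex_candidate" then 2
  else if xs.contains "period_sized_residual" then 3
  else if xs.contains "source_conflict_or_missing_source" then 4
  else if xs.contains "other_large_outlier" then 5
  else 6

theorem pvFoldl_min (g : String → Int) (xs : List String) :
    ∀ b c : Int, xs.foldl (fun a x => min a (g x)) (min b c) = min b (xs.foldl (fun a x => min a (g x)) c) := by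
  induction xs with
  | nil => intro b c; simp
  | cons x xs ih =>
    intro b c
    simp only [List.foldl_cons, min_assoc]
    exact ih b (min c (g x))

theorem pvM_spec (xs : List String) : xs.foldl (fun a x => min a (pvRk x)) 6 = pvC xs := by
  induction xs with
  | nil => simp [pvC]
  | cons x xs ih =>
    have h : (x :: xs).foldl (fun a x => min a (pvRk x)) 6 = min (pvRk x) (pvC xs) := by
      rw [List.foldl_cons]
      have : min (6 : Int) (pvRk x) = min (pvRk x) 6 := min_comm _ _
      rw [this, pvFoldl_min pvRk xs (pvRk x) 6, ih]
    rw [h]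
    by_cases h0 : x = "v3_ordering_candidate"
    · subst h0; simp [pvC, pvRk]; split_ifs <;> omega
    by_cases h1 : x = "starter_simple_candidate"
    · subst h1; simp [pvC, pvRk]; split_ifs <;> omega
    by_cases h2 : x = "starter_complex_candidate"
    · subst h2; simp [pvC, pvRk]; split_ifs <;> omega
    by_cases h3 : x = "period_sized_residual"
    · subst h3; simp [pvC, pvRk]; split_ifs <;> omega
    by_cases h4 : x = "source_conflict_or_missing_source"
    · subst h4; simp [pvC, pvRk]; split_ifs <;> omega
    by_cases h5 : x = "other_large_outlier"
    · subst h5; simp [pvC, pvRk]; split_ifs <;> omega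
    have hr : pvRk x = 6 := by simp [pvRk, h0, h1, h2, h3, h4, h5]
    have hcc : pvC (x :: xs) = pvC xs := by
      simp [pvC, Ne.symm h0, Ne.symm h1, Ne.symm h2, Ne.symm h3,
            Ne.symm h4, Ne.symm h5]
    rw [hr, hcc]
    unfold pvC
    split_ifs <;> omega

theorem pvB_eq (xs : List String) :
    choose_primary_family_py_alt xs =
      (if pvC xs < 6 then
        match PySem.List.pyGet? pvPriorityB (pvC xs) with
        | some s => s
        | none => "other_large_outlier"
      else "other_large_outlier") := by
  have hf : pvStep = fun a x => min a (pvRk x) := by funext a x; exact pvStep_min a x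
  simp only [choose_primary_family_py_alt, hf, pvPriorityB]
  simpa using congrArg (fun v => (if v < (6:Int) then
        match PySem.List.pyGet? pvPriorityB v with
        | some s => s
        | none => "other_large_outlier"
      else "other_large_outlier")) (pvM_spec xs)

theorem pvA_eq (xs : List String) :
    choose_primary_family_py xs =
      (if xs.contains "v3_ordering_candidate" then "v3_ordering_candidate"
      else if xs.contains "starter_simple_candidate" then "starter_simple_candidate"
      else if xs.contains "starter_complex_candidate" then "starter_complex_candidate"
      else if xs.contains "period_sized_residual" then "period_sized_residual"
      else if xs.contains "source_conflict_or_missing_source" then "source_conflict_or_missing_source"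
      else "other_large_outlier") := by
  simp [choose_primary_family_py, pvPriority, pvALoop, PySem.Set.contains, PySem.Set.mem_ofList]

-- ===== VERDICT (by name: the statement is the Claim_ definition above) =====
theorem choose_primary_family_py_spec : Claim_equal_choose_primary_family_py := by
  intro families _
  unfold Spec_choose_primary_family_py
  rw [pvA_eq, pvB_eq]
  unfold pvC
  split_ifs <;> first | omega | simp [pvPriority, pvPriorityB, PySem.List.pyGet?, PySem.List.pyIdx?]
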